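-- pv_equiv track=rewrite | github.com/Tanishadot/Lucid | backend/services/response_style_formatter.py | _fill_question_template
-- ===== SOURCE A (Python) =====
-- def _fill_question_template(template: str, theme: str) -> str:
--     """Fill question template with theme-appropriate vocabulary."""
--
--     vocabulary = {
--         "comparison": {
--             "standard": "measure",
--             "hierarchy": "ranking",
--             "construct": "comparison"
--         },
--         "perfection": {
--             "measure": "standard",
--             "process": "effort",
--             "judgment": "failure"
--         },
--         "approval": {
--             "validation": "approval",
--             "authority": "truth",
--             "performance": "appearance"
--         },
--         "identity": {
--             "performance": "performance",
--             "authenticity": "being",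
--             "construct": "identity"
--         },
--         "control": {
--             "certainty": "control",
--             "uncertainty": "freedom",
--             "construct": "order"
--         }
--     }
--
--     theme_vocab = vocabulary.get(theme, vocabulary["identity"])
--
--     # Simple template filling
--     question = template
--     for key, value in theme_vocab.items():
--         question = question.replace(f"{{{key}}}", value)
--
--     return question
-- ===== SOURCE B (Python) =====
-- def _fill_question_template(template: str, theme: str) -> str:
--     """Fill question template with theme-appropriate vocabulary.
--
--     Different structure from the original: the theme is dispatched by an
--     if/elif chain to a precomputed list of ("{placeholder}", value) pairs
--     (no nested dict), and the filling is one left-to-right scan that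
--     substitutes the first placeholder starting at the current position,
--     instead of one whole-string str.replace pass per key.
--     """
--     if theme == "comparison":
--         pairs = [("{standard}", "measure"), ("{hierarchy}", "ranking"),
--                  ("{construct}", "comparison")]
--     elif theme == "perfection":
--         pairs = [("{measure}", "standard"), ("{process}", "effort"),
--                  ("{judgment}", "failure")]
--     elif theme == "approval":
--         pairs = [("{validation}", "approval"), ("{authority}", "truth"),
--                  ("{performance}", "appearance")]
--     elif theme == "control":
--         pairs = [("{certainty}", "control"), ("{uncertainty}", "freedom"),
--                  ("{construct}", "order")]
--     else:  # "identity" and any unknown theme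
--         pairs = [("{performance}", "performance"), ("{authenticity}", "being"),
--                  ("{construct}", "identity")]
--
--     out = []
--     i = 0
--     n = len(template)
--     while i < n:
--         for ph, value in pairs:
--             if template.startswith(ph, i):
--                 out.append(value)
--                 i += len(ph)
--                 break
--         else:
--             out.append(template[i])
--             i += 1
--     return "".join(out)
-- ===== Notes on version B (the rewrite author's own statement) =====
-- stated objective: alternative
-- what changed: A selects a nested dict and makes three sequential whole-string str.replace passes (one per key); B dispatches the theme by an if/elif chain to a flat list of placeholder/value pairs and fills the template in a single left-to-right scan, substituting at each position the first placeholder that starts there.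
import Mathlib
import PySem

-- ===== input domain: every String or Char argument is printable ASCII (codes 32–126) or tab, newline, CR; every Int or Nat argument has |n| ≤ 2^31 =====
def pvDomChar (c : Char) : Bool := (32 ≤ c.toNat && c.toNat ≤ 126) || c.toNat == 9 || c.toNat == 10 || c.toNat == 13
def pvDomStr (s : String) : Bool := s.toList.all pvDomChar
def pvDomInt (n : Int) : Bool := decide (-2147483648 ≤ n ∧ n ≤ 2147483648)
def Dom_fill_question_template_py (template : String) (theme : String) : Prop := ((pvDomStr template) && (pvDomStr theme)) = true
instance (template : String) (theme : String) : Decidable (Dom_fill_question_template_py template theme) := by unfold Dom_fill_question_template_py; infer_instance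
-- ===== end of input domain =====

-- B replaces A's nested-dict lookup + three sequential whole-string str.replace passes by an if/elif
-- dispatch to a flat placeholder/value pair list and a single left-to-right scan (objective: alternative).

-- ===== PORT A =====
-- the vocabulary table (A's dict-of-dicts literal)
def pvVocab : PySem.Dict String (PySem.Dict String String) :=
  PySem.Dict.ofList
    [ ("comparison", PySem.Dict.ofList [("standard","measure"),("hierarchy","ranking"),("construct","comparison")]),
      ("perfection", PySem.Dict.ofList [("measure","standard"),("process","effort"),("judgment","failure")]),
      ("approval",   PySem.Dict.ofList [("validation","approval"),("authority","truth"),("performance","appearance")]),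
      ("identity",   PySem.Dict.ofList [("performance","performance"),("authenticity","being"),("construct","identity")]),
      ("control",    PySem.Dict.ofList [("certainty","control"),("uncertainty","freedom"),("construct","order")]) ]

-- vocabulary.get(theme, vocabulary["identity"]): "identity" is a key of the literal table, so the
-- KeyError branch of vocabulary["identity"] is unreachable and `.getD Dict.empty` is exact;
-- then: for key, value in theme_vocab.items(): question = question.replace("{"+key+"}", value)
def fill_question_template_py (template : String) (theme : String) : String :=
  (PySem.Dict.items (PySem.Dict.getD pvVocab theme ((PySem.Dict.get? pvVocab "identity").getD PySem.Dict.empty))).foldl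
    (fun question kv => PySem.Str.replace question ("{" ++ kv.1 ++ "}") kv.2) template

-- ===== PORT B =====
-- Source B's if/elif chain selecting the flat ("{placeholder}", value) pair list for the theme
def pvPairsFor (theme : String) : List (String × String) :=
  if theme = "comparison" then
    [("{standard}", "measure"), ("{hierarchy}", "ranking"), ("{construct}", "comparison")]
  else if theme = "perfection" then
    [("{measure}", "standard"), ("{process}", "effort"), ("{judgment}", "failure")]
  else if theme = "approval" then
    [("{validation}", "approval"), ("{authority}", "truth"), ("{performance}", "appearance")]
  else if theme = "control" then
    [("{certainty}", "control"), ("{uncertainty}", "freedom"), ("{construct}", "order")]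
  else -- "identity" and any unknown theme
    [("{performance}", "performance"), ("{authenticity}", "being"), ("{construct}", "identity")]

-- Source B's while-loop over the position i, ported as structural recursion on the remaining suffix;
-- `find?` is the inner `for ph, value in pairs: if template.startswith(ph, i)` loop;
-- `t.drop (kv.1.length - 1)` is `(c :: t).drop kv.1.length` for the (nonempty) placeholders "{…}"
def pvScan (pairs : List (List Char × List Char)) : List Char → List Char
  | [] => []
  | c :: t =>
    match pairs.find? (fun kv => kv.1.isPrefixOf (c :: t)) with
    | some kv => kv.2 ++ pvScan pairs (t.drop (kv.1.length - 1))
    | none => c :: pvScan pairs t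
termination_by l => l.length
decreasing_by
  · simp only [List.length_cons, List.length_drop]; omega
  · simp

def fill_question_template_py_alt (template : String) (theme : String) : String :=
  String.ofList (pvScan ((pvPairsFor theme).map (fun kv => (kv.1.toList, kv.2.toList))) template.toList)

-- ===== PRECONDITION & SPEC =====
def Spec_fill_question_template_py (template : String) (theme : String) (out : String) : Prop := out = fill_question_template_py_alt template theme
instance (template : String) (theme : String) (out : String) : Decidable (Spec_fill_question_template_py template theme out) := by unfold Spec_fill_question_template_py; infer_instance

-- ===== CLAIM (what is proved, stated in full; the proofs are below) =====
def Claim_equal_fill_question_template_py : Prop := ∀ (template : String) (theme : String), Dom_fill_question_template_py template theme → Spec_fill_question_template_py template theme (fill_question_template_py template theme)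

-- ===== LEMMAS AND PROOFS =====

-- single-pattern str.replace as plain structural recursion (equals PySem.Chars.replace for old ≠ [])
def pvRep (p v : List Char) : List Char → List Char
  | [] => []
  | c :: t =>
    if p.isPrefixOf (c :: t) then v ++ pvRep p v (t.drop (p.length - 1))
    else c :: pvRep p v t
termination_by l => l.length
decreasing_by
  · simp only [List.length_cons, List.length_drop]; omega
  · simp

theorem pvRep_go (old new : List Char) (hold : old ≠ []) :
    ∀ fuel l acc, l.length ≤ fuel →
      PySem.Chars.replace.go old new fuel l acc = acc.reverse ++ pvRep old new l := by
  intro fuel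
  induction fuel with
  | zero =>
      intro l acc h
      have hl : l = [] := List.eq_nil_of_length_eq_zero (Nat.le_zero.mp h)
      subst hl
      simp [PySem.Chars.replace.go, pvRep]
  | succ n ih =>
      intro l acc h
      cases l with
      | nil => simp [PySem.Chars.replace.go, pvRep]
      | cons c t =>
          rw [show PySem.Chars.replace.go old new (n+1) (c :: t) acc
              = if old.isPrefixOf (c :: t) then
                  PySem.Chars.replace.go old new n (List.drop old.length (c :: t)) (new.reverse ++ acc)
                else PySem.Chars.replace.go old new n t (c :: acc) from rfl]
          rw [pvRep]
          have hlen : 1 ≤ old.length := by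
            cases old with
            | nil => exact absurd rfl hold
            | cons a b => simp
          split
          · rw [ih _ _ (by
              simp only [List.length_drop, List.length_cons]
              simp only [List.length_cons] at h
              omega)]
            have hd : List.drop old.length (c :: t) = t.drop (old.length - 1) := by
              cases old with
              | nil => exact absurd rfl hold
              | cons a b => simp
            rw [hd]; simp
          · rw [ih _ _ (by simp only [List.length_cons] at h; omega)]
            simp

theorem replace_eq_pvRep (s old new : List Char) (hold : old ≠ []) :
    PySem.Chars.replace s old new = pvRep old new s := by
  unfold PySem.Chars.replace
  rw [if_neg (by simpa [List.isEmpty_iff] using hold)]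
  simpa using pvRep_go old new hold s.length s [] le_rfl

-- the pattern starts with '{', so it matches nowhere inside a brace-free block u
theorem pvRep_append_of_no_open (p v : List Char) (hp : p.head? = some '{') :
    ∀ u X, '{' ∉ u → pvRep p v (u ++ X) = u ++ pvRep p v X := by
  intro u
  induction u with
  | nil => intro X _; simp
  | cons a u ih =>
      intro X hu
      have ha : a ≠ '{' := fun h => hu (by simp [h])
      have hnp : ¬ p.isPrefixOf (a :: (u ++ X)) := by
        rw [List.isPrefixOf_iff_prefix]
        rintro ⟨w, hw⟩
        cases p with
        | nil => simp at hp
        | cons q qs =>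
            have hq : q = '{' := by simpa using hp
            rw [List.cons_append] at hw
            injection hw with h1 _
            exact ha (h1 ▸ hq)
      rw [show (a :: u) ++ X = a :: (u ++ X) from rfl, pvRep, if_neg hnp,
          ih X (fun h => hu (List.mem_cons_of_mem a h))]
      rfl

-- two distinct brace-free keys: "k2}" never starts "k3}…"
theorem key_close_not_prefix :
    ∀ (k2 k3 Z : List Char), ('}' : Char) ∉ k2 → ('}' : Char) ∉ k3 → k2 ≠ k3 →
      ¬ (k2 ++ ['}'] <+: k3 ++ '}' :: Z) := by
  intro k2
  induction k2 with
  | nil =>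
      intro k3 Z _ h3 hne hpre
      cases k3 with
      | nil => exact hne rfl
      | cons b k3' =>
          rcases hpre with ⟨w, hw⟩
          simp only [List.nil_append, List.cons_append] at hw
          injection hw with h1 _
          exact h3 (by simp [← h1])
  | cons a k2' ih =>
      intro k3 Z h2 h3 hne hpre
      cases k3 with
      | nil =>
          rcases hpre with ⟨w, hw⟩
          simp only [List.cons_append, List.nil_append] at hw
          injection hw with h1 _
          exact h2 (by simp [h1])
      | cons b k3' =>
          rcases hpre with ⟨w, hw⟩
          simp only [List.cons_append, List.append_assoc] at hw
          injection hw with h1 h2'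
          subst h1
          exact ih k3' Z (fun h => h2 (List.mem_cons_of_mem _ h))
            (fun h => h3 (List.mem_cons_of_mem _ h))
            (fun h => hne (by rw [h]))
            ⟨w, by simpa [List.append_assoc] using h2'⟩

-- replacing p by a brace-free v cannot create a new occurrence of a brace-free,
-- '}'-terminated block r (as long as v does not itself sit inside r)
theorem pv_prefix_of_pvRep (p v : List Char) (hvC : ('}' : Char) ∉ v) :
    ∀ n X r, X.length ≤ n → '{' ∉ r → (∀ c, r.getLast? = some c → c = '}') →
      ¬ v <:+: r → r <+: pvRep p v X → r <+: X := by
  intro n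
  induction n with
  | zero =>
      intro X r hX _ _ _ hpre
      have hXn : X = [] := List.eq_nil_of_length_eq_zero (Nat.le_zero.mp hX)
      subst hXn
      simpa [pvRep] using hpre
  | succ n ih =>
      intro X r hX hrO hrC hinf hpre
      cases X with
      | nil => simpa [pvRep] using hpre
      | cons c t =>
          by_cases hps : p.isPrefixOf (c :: t)
          · rw [pvRep, if_pos hps] at hpre
            by_cases hle : r.length ≤ v.length
            · have hrv : r <+: v :=
                List.prefix_of_prefix_length_le hpre (List.prefix_append v _) hle
              cases r with
              | nil => exact List.nil_prefix
              | cons a r' =>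
                  have hlast : ('}' : Char) ∈ a :: r' := by
                    have h1 := hrC ((a :: r').getLast (by simp))
                      (by rw [List.getLast?_eq_some_getLast])
                    rw [← h1]; exact List.getLast_mem _
                  exact absurd (hrv.subset hlast) hvC
            · have hvr : v <+: r :=
                List.prefix_of_prefix_length_le (List.prefix_append v _) hpre
                  (Nat.le_of_lt (Nat.lt_of_not_le hle))
              exact absurd hvr.isInfix hinf
          · rw [pvRep, if_neg hps] at hpre
            cases r with
            | nil => exact List.nil_prefix
            | cons a r' =>
                rw [List.cons_prefix_cons] at hpre
                obtain ⟨hac, hpre'⟩ := hpre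
                subst hac
                have hr' : r' <+: t := by
                  refine ih t r' (by simp only [List.length_cons] at hX; omega)
                    (fun h => hrO (List.mem_cons_of_mem _ h)) ?_ ?_ hpre'
                  · intro d hd
                    refine hrC d ?_
                    cases r' with
                    | nil => simp at hd
                    | cons b l => rw [List.getLast?_cons_cons]; exact hd
                  · exact fun h => hinf (h.trans (List.suffix_cons a r').isInfix)
                exact List.cons_prefix_cons.mpr ⟨rfl, hr'⟩

-- skipping one whole (different-key) placeholder block
theorem pvRep_self (k v X : List Char) :
    pvRep ('{' :: (k ++ ['}'])) v (('{' :: (k ++ ['}'])) ++ X)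
      = v ++ pvRep ('{' :: (k ++ ['}'])) v X := by
  rw [show ('{' :: (k ++ ['}'])) ++ X = '{' :: ((k ++ ['}']) ++ X) from rfl, pvRep,
      if_pos (List.isPrefixOf_iff_prefix.mpr (List.cons_prefix_cons.mpr ⟨rfl, List.prefix_append _ _⟩))]
  simp

theorem pvRep_skip_other (kp kq v X : List Char)
    (hkpC : ('}' : Char) ∉ kp) (hkqO : '{' ∉ kq) (hkqC : ('}' : Char) ∉ kq) (hne : kp ≠ kq) :
    pvRep ('{' :: (kp ++ ['}'])) v (('{' :: (kq ++ ['}'])) ++ X)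
      = ('{' :: (kq ++ ['}'])) ++ pvRep ('{' :: (kp ++ ['}'])) v X := by
  have hnp : ¬ ('{' :: (kp ++ ['}'])).isPrefixOf ('{' :: ((kq ++ ['}']) ++ X)) := by
    rw [List.isPrefixOf_iff_prefix, List.cons_prefix_cons]
    rintro ⟨-, hpre⟩
    exact key_close_not_prefix kp kq X hkpC hkqC hne
      (by simpa [List.append_assoc] using hpre)
  rw [show ('{' :: (kq ++ ['}'])) ++ X = '{' :: ((kq ++ ['}']) ++ X) from rfl, pvRep, if_neg hnp,
      pvRep_append_of_no_open _ v rfl (kq ++ ['}']) X (by simp [hkqO])]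
  rfl

-- a placeholder that did not occur cannot occur after an unrelated replacement
theorem pv_not_prefix_pvRep (kp kq v : List Char) (hv : v ≠ [])
    (hvO : '{' ∉ v) (hvC : ('}' : Char) ∉ v) (hkqO : '{' ∉ kq)
    (hinf : ¬ v <:+: (kq ++ ['}'])) :
    ∀ X, ¬ ('{' :: (kq ++ ['}'])) <+: X →
      ¬ ('{' :: (kq ++ ['}'])) <+: pvRep ('{' :: (kp ++ ['}'])) v X := by
  intro X hX hpre
  cases X with
  | nil => simp [pvRep] at hpre
  | cons c t =>
      by_cases hps : ('{' :: (kp ++ ['}'])).isPrefixOf (c :: t)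
      · rw [pvRep, if_pos hps] at hpre
        by_cases hle : ('{' :: (kq ++ ['}'])).length ≤ v.length
        · have hrv := List.prefix_of_prefix_length_le hpre (List.prefix_append v _) hle
          exact hvO (hrv.subset (by simp))
        · have hvr := List.prefix_of_prefix_length_le (List.prefix_append v _) hpre
            (Nat.le_of_lt (Nat.lt_of_not_le hle))
          cases v with
          | nil => exact hv rfl
          | cons b w =>
              rw [List.cons_prefix_cons] at hvr
              exact hvO (by simp [hvr.1])
      · rw [pvRep, if_neg hps] at hpre
        rw [List.cons_prefix_cons] at hpre
        obtain ⟨hc, hpre'⟩ := hpre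
        have := pv_prefix_of_pvRep ('{' :: (kp ++ ['}'])) v hvC t.length t (kq ++ ['}'])
          le_rfl (by simp [hkqO]) (by
            intro d hd
            simp at hd
            first
            | exact hd
            | exact hd.symm) hinf hpre'
        exact hX (by rw [← hc]; exact List.cons_prefix_cons.mpr ⟨rfl, this⟩)

-- the master lemma: three sequential replaces = one simultaneous scan
theorem chain_eq_scan (k1 v1 k2 v2 k3 v3 : List Char)
    (hk1 : '{' ∉ k1 ∧ ('}' : Char) ∉ k1) (hk2 : '{' ∉ k2 ∧ ('}' : Char) ∉ k2)
    (hk3 : '{' ∉ k3 ∧ ('}' : Char) ∉ k3)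
    (hv1 : '{' ∉ v1 ∧ ('}' : Char) ∉ v1 ∧ v1 ≠ [])
    (hv2 : '{' ∉ v2 ∧ ('}' : Char) ∉ v2 ∧ v2 ≠ [])
    (_hv3 : '{' ∉ v3 ∧ ('}' : Char) ∉ v3 ∧ v3 ≠ [])
    (hne12 : k1 ≠ k2) (hne13 : k1 ≠ k3) (hne23 : k2 ≠ k3)
    (hi12 : ¬ v1 <:+: (k2 ++ ['}'])) (hi13 : ¬ v1 <:+: (k3 ++ ['}']))
    (hi23 : ¬ v2 <:+: (k3 ++ ['}'])) :
    ∀ n s, s.length ≤ n →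
      pvRep ('{' :: (k3 ++ ['}'])) v3 (pvRep ('{' :: (k2 ++ ['}'])) v2 (pvRep ('{' :: (k1 ++ ['}'])) v1 s))
        = pvScan [('{' :: (k1 ++ ['}']), v1), ('{' :: (k2 ++ ['}']), v2), ('{' :: (k3 ++ ['}']), v3)] s := by
  intro n
  induction n with
  | zero =>
      intro s hs
      have hsn : s = [] := List.eq_nil_of_length_eq_zero (Nat.le_zero.mp hs)
      subst hsn
      simp [pvRep, pvScan]
  | succ n ih =>
      intro s hs
      cases s with
      | nil => simp [pvRep, pvScan]
      | cons c t =>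
          by_cases h1 : ('{' :: (k1 ++ ['}'])) <+: (c :: t)
          · obtain ⟨rest, hrest⟩ := h1
            rw [← hrest, pvRep_self, pvRep_append_of_no_open _ v2 rfl v1 _ hv1.1,
                pvRep_append_of_no_open _ v3 rfl v1 _ hv1.1]
            rw [show ('{' :: (k1 ++ ['}'])) ++ rest = '{' :: ((k1 ++ ['}']) ++ rest) from rfl, pvScan]
            rw [List.find?_cons_of_pos (by
              exact List.isPrefixOf_iff_prefix.mpr (List.cons_prefix_cons.mpr ⟨rfl, List.prefix_append _ _⟩))]
            simp only [List.length_cons, Nat.add_sub_cancel, List.drop_left]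
            rw [ih rest (by
              have hlr := congrArg List.length hrest
              simp only [List.length_append, List.length_cons] at hlr
              simp only [List.length_cons] at hs
              omega)]
          · by_cases h2 : ('{' :: (k2 ++ ['}'])) <+: (c :: t)
            · obtain ⟨rest, hrest⟩ := h2
              rw [← hrest] at h1 ⊢
              rw [pvRep_skip_other k1 k2 v1 rest hk1.2 hk2.1 hk2.2 hne12, pvRep_self,
                  pvRep_append_of_no_open _ v3 rfl v2 _ hv2.1]
              rw [show ('{' :: (k2 ++ ['}'])) ++ rest = '{' :: ((k2 ++ ['}']) ++ rest) from rfl, pvScan]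
              rw [List.find?_cons_of_neg (by
                    simp only [List.isPrefixOf_iff_prefix]
                    simpa using h1),
                  List.find?_cons_of_pos (by
                    exact List.isPrefixOf_iff_prefix.mpr (List.cons_prefix_cons.mpr ⟨rfl, List.prefix_append _ _⟩))]
              simp only [List.length_cons, Nat.add_sub_cancel, List.drop_left]
              rw [ih rest (by
                have hlr := congrArg List.length hrest
                simp only [List.length_append, List.length_cons] at hlr
                simp only [List.length_cons] at hs
                omega)]
            · by_cases h3 : ('{' :: (k3 ++ ['}'])) <+: (c :: t)
              · obtain ⟨rest, hrest⟩ := h3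
                rw [← hrest] at h1 h2 ⊢
                rw [pvRep_skip_other k1 k3 v1 rest hk1.2 hk3.1 hk3.2 hne13,
                    pvRep_skip_other k2 k3 v2 (pvRep ('{' :: (k1 ++ ['}'])) v1 rest) hk2.2 hk3.1 hk3.2 hne23,
                    pvRep_self]
                rw [show ('{' :: (k3 ++ ['}'])) ++ rest = '{' :: ((k3 ++ ['}']) ++ rest) from rfl, pvScan]
                rw [List.find?_cons_of_neg (by
                      simp only [List.isPrefixOf_iff_prefix]
                      simpa using h1),
                    List.find?_cons_of_neg (by
                      simp only [List.isPrefixOf_iff_prefix]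
                      simpa using h2),
                    List.find?_cons_of_pos (by
                      exact List.isPrefixOf_iff_prefix.mpr (List.cons_prefix_cons.mpr ⟨rfl, List.prefix_append _ _⟩))]
                simp only [List.length_cons, Nat.add_sub_cancel, List.drop_left]
                rw [ih rest (by
                  have hlr := congrArg List.length hrest
                  simp only [List.length_append, List.length_cons] at hlr
                  simp only [List.length_cons] at hs
                  omega)]
              · have e1 : pvRep ('{' :: (k1 ++ ['}'])) v1 (c :: t)
                    = c :: pvRep ('{' :: (k1 ++ ['}'])) v1 t := by
                  rw [pvRep, if_neg (by rw [List.isPrefixOf_iff_prefix]; exact h1)]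
                have h2' := pv_not_prefix_pvRep k1 k2 v1 hv1.2.2 hv1.1 hv1.2.1 hk2.1 hi12 (c :: t) h2
                have h3' := pv_not_prefix_pvRep k1 k3 v1 hv1.2.2 hv1.1 hv1.2.1 hk3.1 hi13 (c :: t) h3
                rw [e1] at h2' h3'
                have e2 : pvRep ('{' :: (k2 ++ ['}'])) v2 (c :: pvRep ('{' :: (k1 ++ ['}'])) v1 t)
                    = c :: pvRep ('{' :: (k2 ++ ['}'])) v2 (pvRep ('{' :: (k1 ++ ['}'])) v1 t) := by
                  rw [pvRep, if_neg (by rw [List.isPrefixOf_iff_prefix]; exact h2')]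
                have h3'' := pv_not_prefix_pvRep k2 k3 v2 hv2.2.2 hv2.1 hv2.2.1 hk3.1 hi23
                  (c :: pvRep ('{' :: (k1 ++ ['}'])) v1 t) h3'
                rw [e2] at h3''
                have e3 : pvRep ('{' :: (k3 ++ ['}'])) v3
                      (c :: pvRep ('{' :: (k2 ++ ['}'])) v2 (pvRep ('{' :: (k1 ++ ['}'])) v1 t))
                    = c :: pvRep ('{' :: (k3 ++ ['}'])) v3
                        (pvRep ('{' :: (k2 ++ ['}'])) v2 (pvRep ('{' :: (k1 ++ ['}'])) v1 t)) := by
                  rw [pvRep, if_neg (by rw [List.isPrefixOf_iff_prefix]; exact h3'')]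
                rw [e1, e2, e3, ih t (by simp only [List.length_cons] at hs; omega), pvScan,
                    List.find?_cons_of_neg (by
                      simp only [List.isPrefixOf_iff_prefix]
                      simpa using h1),
                    List.find?_cons_of_neg (by
                      simp only [List.isPrefixOf_iff_prefix]
                      simpa using h2),
                    List.find?_cons_of_neg (by
                      simp only [List.isPrefixOf_iff_prefix]
                      simpa using h3)]
                rfl

-- packaged per-theme equality at String level
theorem per_vocab (K1 V1 K2 V2 K3 V3 template : String)
    (hk1 : '{' ∉ K1.toList ∧ ('}' : Char) ∉ K1.toList)
    (hk2 : '{' ∉ K2.toList ∧ ('}' : Char) ∉ K2.toList)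
    (hk3 : '{' ∉ K3.toList ∧ ('}' : Char) ∉ K3.toList)
    (hv1 : '{' ∉ V1.toList ∧ ('}' : Char) ∉ V1.toList ∧ V1.toList ≠ [])
    (hv2 : '{' ∉ V2.toList ∧ ('}' : Char) ∉ V2.toList ∧ V2.toList ≠ [])
    (hv3 : '{' ∉ V3.toList ∧ ('}' : Char) ∉ V3.toList ∧ V3.toList ≠ [])
    (hne12 : K1.toList ≠ K2.toList) (hne13 : K1.toList ≠ K3.toList) (hne23 : K2.toList ≠ K3.toList)
    (hi12 : ¬ V1.toList <:+: (K2.toList ++ ['}'])) (hi13 : ¬ V1.toList <:+: (K3.toList ++ ['}']))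
    (hi23 : ¬ V2.toList <:+: (K3.toList ++ ['}'])) :
    PySem.Str.replace (PySem.Str.replace (PySem.Str.replace template ("{" ++ K1 ++ "}") V1) ("{" ++ K2 ++ "}") V2) ("{" ++ K3 ++ "}") V3
      = String.ofList (pvScan [(("{" ++ K1 ++ "}").toList, V1.toList), (("{" ++ K2 ++ "}").toList, V2.toList), (("{" ++ K3 ++ "}").toList, V3.toList)] template.toList) := by
  have hsh : ∀ K : String, ("{" ++ K ++ "}").toList = '{' :: (K.toList ++ ['}']) := by
    intro K
    simp [String.toList_append]
  apply String.toList_inj.mp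
  rw [PySem.Str.toList_replace, PySem.Str.toList_replace, PySem.Str.toList_replace]
  rw [replace_eq_pvRep _ _ _ (by rw [hsh]; simp),
      replace_eq_pvRep _ _ _ (by rw [hsh]; simp),
      replace_eq_pvRep _ _ _ (by rw [hsh]; simp)]
  rw [hsh, hsh, hsh]
  rw [chain_eq_scan K1.toList V1.toList K2.toList V2.toList K3.toList V3.toList
      hk1 hk2 hk3 hv1 hv2 hv3 hne12 hne13 hne23 hi12 hi13 hi23 template.toList.length template.toList le_rfl]
  rw [show (String.ofList (pvScan [('{' :: (K1.toList ++ ['}']), V1.toList), ('{' :: (K2.toList ++ ['}']), V2.toList), ('{' :: (K3.toList ++ ['}']), V3.toList)] template.toList)).toList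
      = pvScan [('{' :: (K1.toList ++ ['}']), V1.toList), ('{' :: (K2.toList ++ ['}']), V2.toList), ('{' :: (K3.toList ++ ['}']), V3.toList)] template.toList from by
    rw [String.toList_ofList]]

-- selecting A's vocabulary for a theme not in the table
theorem pv_default_vocab (theme : String)
    (h1 : theme ≠ "comparison") (h2 : theme ≠ "perfection") (h3 : theme ≠ "approval")
    (h4 : theme ≠ "identity") (h5 : theme ≠ "control") :
    PySem.Dict.getD pvVocab theme ((PySem.Dict.get? pvVocab "identity").getD PySem.Dict.empty)
      = PySem.Dict.ofList [("performance","performance"),("authenticity","being"),("construct","identity")] := by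
  have e : pvVocab = PySem.Dict.mk
    [ ("comparison", PySem.Dict.ofList [("standard","measure"),("hierarchy","ranking"),("construct","comparison")]),
      ("perfection", PySem.Dict.ofList [("measure","standard"),("process","effort"),("judgment","failure")]),
      ("approval",   PySem.Dict.ofList [("validation","approval"),("authority","truth"),("performance","appearance")]),
      ("identity",   PySem.Dict.ofList [("performance","performance"),("authenticity","being"),("construct","identity")]),
      ("control",    PySem.Dict.ofList [("certainty","control"),("uncertainty","freedom"),("construct","order")]) ] := by
    rfl
  have d1 : (("comparison" : String) == theme) = false := beq_eq_false_iff_ne.mpr (Ne.symm h1)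
  have d2 : (("perfection" : String) == theme) = false := beq_eq_false_iff_ne.mpr (Ne.symm h2)
  have d3 : (("approval" : String) == theme) = false := beq_eq_false_iff_ne.mpr (Ne.symm h3)
  have d4 : (("identity" : String) == theme) = false := beq_eq_false_iff_ne.mpr (Ne.symm h4)
  have d5 : (("control" : String) == theme) = false := beq_eq_false_iff_ne.mpr (Ne.symm h5)
  rw [PySem.Dict.getD, e]
  simp only [PySem.Dict.get?_mk_cons, d1, d2, d3, d4, d5]
  rfl

-- selecting B's pair list for a theme not in the if/elif chain
theorem pv_default_pairs (theme : String)
    (h1 : theme ≠ "comparison") (h2 : theme ≠ "perfection") (h3 : theme ≠ "approval")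
    (h5 : theme ≠ "control") :
    pvPairsFor theme
      = [("{performance}", "performance"), ("{authenticity}", "being"), ("{construct}", "identity")] := by
  unfold pvPairsFor
  rw [if_neg h1, if_neg h2, if_neg h3, if_neg h5]

-- ===== VERDICT (by name: the statement is the Claim_ definition above) =====
theorem fill_question_template_py_spec : Claim_equal_fill_question_template_py := by
  intro template theme _
  unfold Spec_fill_question_template_py
  by_cases hc1 : theme = "comparison"
  · subst hc1
    exact per_vocab "standard" "measure" "hierarchy" "ranking" "construct" "comparison" template
      (by decide) (by decide) (by decide) (by decide) (by decide) (by decide)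
      (by decide) (by decide) (by decide) (by decide) (by decide) (by decide)
  · by_cases hc2 : theme = "perfection"
    · subst hc2
      exact per_vocab "measure" "standard" "process" "effort" "judgment" "failure" template
        (by decide) (by decide) (by decide) (by decide) (by decide) (by decide)
        (by decide) (by decide) (by decide) (by decide) (by decide) (by decide)
    · by_cases hc3 : theme = "approval"
      · subst hc3
        exact per_vocab "validation" "approval" "authority" "truth" "performance" "appearance" template
          (by decide) (by decide) (by decide) (by decide) (by decide) (by decide)
          (by decide) (by decide) (by decide) (by decide) (by decide) (by decide)
      · by_cases hc5 : theme = "control"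
        · subst hc5
          exact per_vocab "certainty" "control" "uncertainty" "freedom" "construct" "order" template
            (by decide) (by decide) (by decide) (by decide) (by decide) (by decide)
            (by decide) (by decide) (by decide) (by decide) (by decide) (by decide)
        · by_cases hc4 : theme = "identity"
          · subst hc4
            exact per_vocab "performance" "performance" "authenticity" "being" "construct" "identity" template
              (by decide) (by decide) (by decide) (by decide) (by decide) (by decide)
              (by decide) (by decide) (by decide) (by decide) (by decide) (by decide)
          · unfold fill_question_template_py fill_question_template_py_alt
            rw [pv_default_vocab theme hc1 hc2 hc3 hc4 hc5, pv_default_pairs theme hc1 hc2 hc3 hc5]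
            exact per_vocab "performance" "performance" "authenticity" "being" "construct" "identity" template
              (by decide) (by decide) (by decide) (by decide) (by decide) (by decide)
              (by decide) (by decide) (by decide) (by decide) (by decide) (by decide)
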